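-- pv_equiv track=rewrite | github.com/safiqsindha/Project-Ditto-v2 | src/scorer.py | classify_chain
-- ===== SOURCE A (Python) =====
-- def classify_chain(chain: dict) -> dict[str, str]:
--     """Classify a chain into Layer 3 subsets."""
--     constraints = chain.get("constraints", [])
--     n = len(constraints)
--
--     # Length bucket
--     if n <= 25:
--         length_bucket = "short_20_25"
--     elif n <= 32:
--         length_bucket = "medium_26_32"
--     else:
--         length_bucket = "long_33_40"
--
--     # Constraint-type composition
--     n_resource = sum(1 for c in constraints if c.get("type") == "ResourceBudget")
--     n_subgoal = sum(1 for c in constraints if c.get("type") == "SubGoalTransition")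
--     if n_resource > n_subgoal:
--         composition = "resource_dominated"
--     elif n_subgoal > n_resource:
--         composition = "subgoal_dominated"
--     else:
--         composition = "balanced"
--
--     # Archetype heuristic
--     n_faint_tool = sum(
--         1 for c in constraints
--         if c.get("type") == "ToolAvailability" and c.get("state") == "unavailable" and c.get("recover_in") is None
--     )
--     n_boost = sum(
--         1 for c in constraints
--         if c.get("type") == "ResourceBudget" and "boost" in c.get("resource", "")
--     )
--     if n_faint_tool >= 4:
--         archetype = "aggressive"
--     elif n_boost >= 3:
--         archetype = "setup"
--     else:
--         archetype = "stall"
--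
--     return {
--         "length_bucket": length_bucket,
--         "composition": composition,
--         "archetype": archetype,
--     }
-- ===== SOURCE B (Python) =====
-- def classify_chain(chain: dict) -> dict[str, str]:
--     """Classify a chain into Layer 3 subsets (single-pass tally)."""
--     constraints = chain.get("constraints", [])
--
--     n_resource = n_subgoal = n_faint_tool = n_boost = 0
--     for c in constraints:
--         t = c.get("type")
--         if t == "ResourceBudget":
--             n_resource += 1
--             if "boost" in c.get("resource", ""):
--                 n_boost += 1
--         elif t == "SubGoalTransition":
--             n_subgoal += 1
--         elif t == "ToolAvailability" and c.get("state") == "unavailable" and c.get("recover_in") is None: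
--             n_faint_tool += 1
--
--     n = len(constraints)
--     if n <= 25:
--         length_bucket = "short_20_25"
--     elif n <= 32:
--         length_bucket = "medium_26_32"
--     else:
--         length_bucket = "long_33_40"
--
--     if n_resource > n_subgoal:
--         composition = "resource_dominated"
--     elif n_subgoal > n_resource:
--         composition = "subgoal_dominated"
--     else:
--         composition = "balanced"
--
--     if n_faint_tool >= 4:
--         archetype = "aggressive"
--     elif n_boost >= 3:
--         archetype = "setup"
--     else:
--         archetype = "stall"
--
--     return {
--         "length_bucket": length_bucket,
--         "composition": composition,
--         "archetype": archetype,
--     }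
-- ===== Notes on version B (the rewrite author's own statement) =====
-- stated objective: alternative
-- what changed: A makes four separate filtered scans over the constraints list (one sum per tally); B traverses the list once, maintaining all four counters in a single loop with an if/elif branch per constraint, then applies the same threshold decisions.
import Mathlib
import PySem

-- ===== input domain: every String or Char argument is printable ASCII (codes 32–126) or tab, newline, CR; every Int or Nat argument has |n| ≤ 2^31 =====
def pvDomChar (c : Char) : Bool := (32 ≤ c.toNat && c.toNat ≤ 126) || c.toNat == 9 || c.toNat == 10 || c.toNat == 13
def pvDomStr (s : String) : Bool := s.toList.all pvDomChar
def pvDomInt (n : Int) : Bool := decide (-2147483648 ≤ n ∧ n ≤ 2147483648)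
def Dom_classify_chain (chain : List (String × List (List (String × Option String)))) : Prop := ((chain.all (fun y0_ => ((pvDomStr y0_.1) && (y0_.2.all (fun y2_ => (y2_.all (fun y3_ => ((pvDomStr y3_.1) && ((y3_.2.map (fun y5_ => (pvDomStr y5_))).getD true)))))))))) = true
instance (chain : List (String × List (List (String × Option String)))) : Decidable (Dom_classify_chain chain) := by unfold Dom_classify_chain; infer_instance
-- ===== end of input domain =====

-- ===== PORT A =====
-- B collapses A's four filtered scans over the constraints into one counting loop (same outputs; alternative decomposition).
-- c.get(k)  (default None)
def pyGetK (c : List (String × Option String)) (k : String) : Option String :=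
  ((PySem.Dict.mk c).get? k).getD none

-- c.get("resource", ""): key absent -> ""; a present None value is excluded by Pre_ (Python raises TypeError there)
def resourceStr (c : List (String × Option String)) : String :=
  (((PySem.Dict.mk c).get? "resource").getD (some "")).getD ""

def classify_chain (chain : List (String × List (List (String × Option String)))) : List (String × String) :=
  let constraints := ((PySem.Dict.mk chain).get? "constraints").getD []
  let n := constraints.length
  let length_bucket :=
    if n ≤ 25 then "short_20_25" else if n ≤ 32 then "medium_26_32" else "long_33_40"
  let n_resource := constraints.countP (fun c => pyGetK c "type" == some "ResourceBudget")
  let n_subgoal := constraints.countP (fun c => pyGetK c "type" == some "SubGoalTransition")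
  let composition :=
    if n_resource > n_subgoal then "resource_dominated"
    else if n_subgoal > n_resource then "subgoal_dominated" else "balanced"
  let n_faint_tool := constraints.countP (fun c =>
    pyGetK c "type" == some "ToolAvailability" && pyGetK c "state" == some "unavailable"
      && pyGetK c "recover_in" == none)
  let n_boost := constraints.countP (fun c =>
    pyGetK c "type" == some "ResourceBudget" && PySem.Str.isIn "boost" (resourceStr c))
  let archetype :=
    if n_faint_tool ≥ 4 then "aggressive" else if n_boost ≥ 3 then "setup" else "stall"
  [("length_bucket", length_bucket), ("composition", composition), ("archetype", archetype)]

-- ===== PORT B =====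
-- one step of B's single tallying loop: (n_resource, n_subgoal, n_faint_tool, n_boost)
def tallyStep (acc : Nat × Nat × Nat × Nat) (c : List (String × Option String)) :
    Nat × Nat × Nat × Nat :=
  let t := pyGetK c "type"
  if t == some "ResourceBudget" then
    if PySem.Str.isIn "boost" (resourceStr c) then (acc.1 + 1, acc.2.1, acc.2.2.1, acc.2.2.2 + 1)
    else (acc.1 + 1, acc.2.1, acc.2.2.1, acc.2.2.2)
  else if t == some "SubGoalTransition" then (acc.1, acc.2.1 + 1, acc.2.2.1, acc.2.2.2)
  else if t == some "ToolAvailability" && pyGetK c "state" == some "unavailable"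
      && pyGetK c "recover_in" == none then (acc.1, acc.2.1, acc.2.2.1 + 1, acc.2.2.2)
  else acc

def classify_chain_alt (chain : List (String × List (List (String × Option String)))) : List (String × String) :=
  let constraints := ((PySem.Dict.mk chain).get? "constraints").getD []
  let tallies := constraints.foldl tallyStep (0, 0, 0, 0)
  let n_resource := tallies.1
  let n_subgoal := tallies.2.1
  let n_faint_tool := tallies.2.2.1
  let n_boost := tallies.2.2.2
  let n := constraints.length
  let length_bucket :=
    if n ≤ 25 then "short_20_25" else if n ≤ 32 then "medium_26_32" else "long_33_40"
  let composition :=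
    if n_resource > n_subgoal then "resource_dominated"
    else if n_subgoal > n_resource then "subgoal_dominated" else "balanced"
  let archetype :=
    if n_faint_tool ≥ 4 then "aggressive" else if n_boost ≥ 3 then "setup" else "stall"
  [("length_bucket", length_bucket), ("composition", composition), ("archetype", archetype)]

-- ===== PRECONDITION & SPEC =====
-- Pre_ excludes exactly the inputs on which Python A raises TypeError: a constraint whose
-- "type" is "ResourceBudget" and whose "resource" key is present with value None
-- ("boost" in None raises). B raises there too.
def Pre_classify_chain (chain : List (String × List (List (String × Option String)))) : Prop :=
  ∀ c ∈ ((PySem.Dict.mk chain).get? "constraints").getD [],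
    ¬ (pyGetK c "type" = some "ResourceBudget" ∧ (PySem.Dict.mk c).get? "resource" = some none)
instance (chain : List (String × List (List (String × Option String)))) : Decidable (Pre_classify_chain chain) := by unfold Pre_classify_chain; infer_instance

def pvWitness_classify_chain : (List (String × List (List (String × Option String)))) :=
  [("constraints", [[("type", some "ResourceBudget"), ("resource", some "boost_x")],
                    [("type", some "SubGoalTransition")]])]

def Spec_classify_chain (chain : List (String × List (List (String × Option String)))) (out : List (String × String)) : Prop := out = classify_chain_alt chain
instance (chain : List (String × List (List (String × Option String)))) (out : List (String × String)) : Decidable (Spec_classify_chain chain out) := by unfold Spec_classify_chain; infer_instance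

-- ===== CLAIM (what is proved, stated in full; the proofs are below) =====
def Claim_equal_classify_chain : Prop := ∀ (chain : List (String × List (List (String × Option String)))), Dom_classify_chain chain → Pre_classify_chain chain → Spec_classify_chain chain (classify_chain chain)

-- ===== LEMMAS AND PROOFS =====

theorem tally_foldl (l : List (List (String × Option String))) (a b c d : Nat) :
    l.foldl tallyStep (a, b, c, d) =
      (a + l.countP (fun c => pyGetK c "type" == some "ResourceBudget"),
       b + l.countP (fun c => pyGetK c "type" == some "SubGoalTransition"),
       c + l.countP (fun c => pyGetK c "type" == some "ToolAvailability"
             && pyGetK c "state" == some "unavailable" && pyGetK c "recover_in" == none),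
       d + l.countP (fun c => pyGetK c "type" == some "ResourceBudget"
             && PySem.Str.isIn "boost" (resourceStr c))) := by
  induction l generalizing a b c d with
  | nil => simp
  | cons x xs ih =>
    simp only [List.foldl_cons, tallyStep]
    split_ifs <;> rw [ih] <;> simp only [List.countP_cons] <;> simp_all <;> omega

-- ===== VERDICT (by name: the statement is the Claim_ definition above) =====
theorem classify_chain_spec : Claim_equal_classify_chain := by
  intro chain _ _
  unfold Spec_classify_chain classify_chain classify_chain_alt
  simp [tally_foldl]
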